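-- pv_equiv track=rewrite | github.com/Dekelkai/CondaTool | condatools/backend/CondaTool_conda/commands.py | _strip_managed_source_sections
-- ===== SOURCE A (Python) =====
-- MANAGED_SOURCE_KEYS = {"channel_priority", "channels", "default_channels", "custom_channels"}
--
-- def _strip_managed_source_sections(raw_content):
--     lines = raw_content.splitlines()
--     kept_lines = []
--     index = 0
--
--     while index < len(lines):
--         line = lines[index]
--         stripped_line = line.lstrip()
--         indent = len(line) - len(stripped_line)
--
--         if indent == 0 and stripped_line and ":" in stripped_line:
--             key = stripped_line.split(":", 1)[0].strip()
--             if key in MANAGED_SOURCE_KEYS: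
--                 index += 1
--                 while index < len(lines):
--                     next_line = lines[index]
--                     next_stripped = next_line.lstrip()
--                     next_indent = len(next_line) - len(next_stripped)
--
--                     if next_stripped == "":
--                         index += 1
--                         continue
--
--                     if next_indent == 0:
--                         break
--
--                     index += 1
--                 continue
--
--         kept_lines.append(line)
--         index += 1
--
--     while kept_lines and kept_lines[-1].strip() == "":
--         kept_lines.pop()
--
--     return "\n".join(kept_lines)
-- ===== SOURCE B (Python) =====
-- MANAGED_SOURCE_KEYS = {"channel_priority", "channels", "default_channels", "custom_channels"}
--
-- def _strip_managed_source_sections(raw_content):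
--     # Group lines into a preamble plus top-level sections, then keep/drop whole sections.
--     pre, segs, cur = [], [], None
--     for line in raw_content.splitlines():
--         if line and line == line.lstrip():
--             if cur is not None:
--                 segs.append(cur)
--             cur = [line]
--         elif cur is None:
--             pre.append(line)
--         else:
--             cur.append(line)
--     if cur is not None:
--         segs.append(cur)
--     kept = list(pre)
--     for seg in segs:
--         head = seg[0]
--         if ":" not in head or head.split(":", 1)[0].strip() not in MANAGED_SOURCE_KEYS:
--             kept.extend(seg)
--     rev = kept[::-1]
--     while rev and not rev[0].strip():
--         rev = rev[1:]
--     return "\n".join(rev[::-1])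
-- ===== Notes on version B (the rewrite author's own statement) =====
-- stated objective: alternative
-- what changed: Instead of a while-loop with an index and a nested skipping while-loop, B groups the lines in one pass into a preamble plus whole top-level sections, then keeps or drops each section by its head line's key and trims trailing blanks on the reversed list.
import Mathlib
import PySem

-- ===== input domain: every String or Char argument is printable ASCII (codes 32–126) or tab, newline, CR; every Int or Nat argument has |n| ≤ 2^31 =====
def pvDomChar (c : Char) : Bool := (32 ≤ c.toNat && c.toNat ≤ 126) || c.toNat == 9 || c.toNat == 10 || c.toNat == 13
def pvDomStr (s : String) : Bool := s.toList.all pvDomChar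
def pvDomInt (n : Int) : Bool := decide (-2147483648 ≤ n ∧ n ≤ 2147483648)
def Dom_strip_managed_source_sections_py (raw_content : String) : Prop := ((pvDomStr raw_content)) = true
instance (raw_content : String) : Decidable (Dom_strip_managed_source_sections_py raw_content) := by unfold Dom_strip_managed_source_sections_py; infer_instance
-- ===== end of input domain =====

-- B groups lines into preamble + whole top-level sections and filters whole sections,
-- instead of A's index-driven while loop with a nested skipping loop; same values everywhere (objective: alternative).

def pvManagedKeys : List String := ["channel_priority", "channels", "default_channels", "custom_channels"]

-- ===== PORT A =====
-- inner 'while' of A: skip blank or indented lines, stop at a top-level non-blank line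
def pvSkipA (lines : List String) : List String :=
  match lines with
  | [] => []
  | next :: rest =>
    let ns := PySem.Str.lstrip next
    let nindent : Int := (PySem.Str.len next : Int) - (PySem.Str.len ns : Int)
    if ns == "" then pvSkipA rest
    else if nindent == 0 then next :: rest
    else pvSkipA rest

theorem pvSkipA_length_le (lines : List String) : (pvSkipA lines).length ≤ lines.length := by
  induction lines with
  | nil => simp [pvSkipA]
  | cons next rest ih =>
    simp only [pvSkipA]
    split_ifs <;> simp <;> omega

-- outer 'while' of A
def pvGoA (lines : List String) : List String :=
  match lines with
  | [] => []
  | line :: rest =>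
    let stripped := PySem.Str.lstrip line
    let indent : Int := (PySem.Str.len line : Int) - (PySem.Str.len stripped : Int)
    if indent == 0 && stripped != "" && PySem.Str.isIn ":" stripped then
      let key := PySem.Str.strip (((PySem.Str.splitMax? stripped ":" 1).getD []).headD stripped)
      if pvManagedKeys.contains key then pvGoA (pvSkipA rest)
      else line :: pvGoA rest
    else line :: pvGoA rest
termination_by lines.length
decreasing_by
  · have := pvSkipA_length_le rest; simp; omega
  · simp
  · simp

-- trailing 'while kept and kept[-1].strip() == "": kept.pop()'
def pvTrimA (kept : List String) : List String :=
  match h : kept.getLast? with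
  | none => kept
  | some l => if PySem.Str.strip l == "" then pvTrimA kept.dropLast else kept
termination_by kept.length
decreasing_by
  have : kept ≠ [] := by intro hnil; simp [hnil] at h
  cases kept with
  | nil => simp at this
  | cons a t => simp

def strip_managed_source_sections_py (raw_content : String) : String :=
  PySem.Str.join "\n" (pvTrimA (pvGoA (PySem.Str.splitlines raw_content)))

-- ===== PORT B =====
def pvIsBoundary (line : String) : Bool := line != "" && line == PySem.Str.lstrip line

def pvKeepHead (head : String) : Bool :=
  !(PySem.Str.isIn ":" head) ||
    !(pvManagedKeys.contains (PySem.Str.strip (((PySem.Str.splitMax? head ":" 1).getD []).headD head)))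

-- one step of B's grouping loop; state = (pre, segs, cur)
def pvStepB (st : List String × List (List String) × Option (List String)) (line : String) :
    List String × List (List String) × Option (List String) :=
  let (pre, segs, cur) := st
  if pvIsBoundary line then
    match cur with
    | none => (pre, segs, some [line])
    | some c => (pre, segs ++ [c], some [line])
  else
    match cur with
    | none => (pre ++ [line], segs, none)
    | some c => (pre, segs, some (c ++ [line]))

-- B's trailing-blank trim: 'while rev and not rev[0].strip(): rev = rev[1:]'
def pvTrimB (rev : List String) : List String :=
  match rev with
  | [] => []
  | l :: rest => if PySem.Str.strip l == "" then pvTrimB rest else l :: rest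

def strip_managed_source_sections_py_alt (raw_content : String) : String :=
  let st := (PySem.Str.splitlines raw_content).foldl pvStepB ([], [], none)
  let segs := st.2.1 ++ st.2.2.toList
  let kept := st.1 ++ (segs.filter (fun s => pvKeepHead (s.headD ""))).flatten
  PySem.Str.join "\n" ((pvTrimB kept.reverse).reverse)

-- ===== PRECONDITION & SPEC =====
def Spec_strip_managed_source_sections_py (raw_content : String) (out : String) : Prop := out = strip_managed_source_sections_py_alt raw_content
instance (raw_content : String) (out : String) : Decidable (Spec_strip_managed_source_sections_py raw_content out) := by unfold Spec_strip_managed_source_sections_py; infer_instance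

-- ===== CLAIM (what is proved, stated in full; the proofs are below) =====
def Claim_equal_strip_managed_source_sections_py : Prop := ∀ (raw_content : String), Dom_strip_managed_source_sections_py raw_content → Spec_strip_managed_source_sections_py raw_content (strip_managed_source_sections_py raw_content)

-- ===== LEMMAS AND PROOFS =====

-- proof-side view shared by both directions: a segment is a boundary line plus
-- its following non-boundary lines
def pvNotB (x : String) : Bool := !pvIsBoundary x

def pvSpecRec (lines : List String) : List String :=
  match lines with
  | [] => []
  | l :: rest =>
    if pvIsBoundary l then
      (if pvKeepHead l then l :: rest.takeWhile pvNotB else []) ++ pvSpecRec (rest.dropWhile pvNotB)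
    else l :: pvSpecRec rest
termination_by lines.length
decreasing_by
  · exact Nat.lt_succ_of_le (rest.length_dropWhile_le pvNotB)
  · simp

def pvFinal (st : List String × List (List String) × Option (List String)) : List String :=
  st.1 ++ ((st.2.1 ++ st.2.2.toList).filter (fun s => pvKeepHead (s.headD ""))).flatten

theorem pvLstrip_suffix (line : String) : (PySem.Str.lstrip line).toList <:+ line.toList := by
  rw [PySem.Str.toList_lstrip]; exact List.dropWhile_suffix _

theorem pvLstrip_eq_self_iff (line : String) :
    PySem.Str.lstrip line = line ↔ (PySem.Str.lstrip line).toList.length = line.toList.length := by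
  constructor
  · intro h; rw [h]
  · intro h
    exact String.toList_inj.mp ((pvLstrip_suffix line).sublist.eq_of_length h)

theorem pvBoundary_iff (line : String) :
    ((PySem.Str.len line - PySem.Str.len (PySem.Str.lstrip line) == 0) && (PySem.Str.lstrip line != "")) = pvIsBoundary line := by
  have hle : (PySem.Str.lstrip line).toList.length ≤ line.toList.length :=
    (pvLstrip_suffix line).sublist.length_le
  by_cases h : PySem.Str.lstrip line = line
  · rw [pvIsBoundary, h]
    have h0 : ((PySem.Str.len line - PySem.Str.len line : Int) == 0) = true := by simp
    rw [h0]
    simp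
  · have hlen : (PySem.Str.lstrip line).toList.length ≠ line.toList.length := by
      intro hl; exact h ((pvLstrip_eq_self_iff line).mpr hl)
    have h0 : ((PySem.Str.len line - PySem.Str.len (PySem.Str.lstrip line) : Int) == 0) = false := by
      rw [beq_eq_false_iff_ne]
      simp only [PySem.Str.len_eq]
      intro hc
      exact hlen (by omega)
    have h1 : (line == PySem.Str.lstrip line) = false := by
      rw [beq_eq_false_iff_ne]; exact fun hh => h hh.symm
    rw [pvIsBoundary, h0, h1]
    simp

theorem pvBoundary_lstrip {line : String} (h : pvIsBoundary line = true) : PySem.Str.lstrip line = line := by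
  rw [pvIsBoundary] at h
  simp only [Bool.and_eq_true, bne_iff_ne, beq_iff_eq] at h
  exact h.2.symm

theorem pvGoA_cons_notB (x : String) (r : List String) (h : pvIsBoundary x = false) :
    pvGoA (x :: r) = x :: pvGoA r := by
  rw [pvGoA]
  simp only [pvBoundary_iff, h, Bool.false_and, Bool.false_eq_true, if_false]

theorem pvGoA_cons_B_keep (x : String) (r : List String) (h : pvIsBoundary x = true)
    (hk : pvKeepHead x = true) : pvGoA (x :: r) = x :: pvGoA r := by
  rw [pvGoA]
  rw [pvBoundary_lstrip h]
  have hne : (x != "") = true := by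
    rw [pvIsBoundary, Bool.and_eq_true] at h; exact h.1
  rw [pvKeepHead] at hk
  by_cases hin : PySem.Str.isIn ":" x = true
  · simp only [hin, Bool.not_true, Bool.false_or, Bool.not_eq_true'] at hk
    rw [hin]
    simp [hne]
    intro hmem
    simp at hk
    exact absurd hmem hk
  · have hin' : PySem.Str.isIn ":" x = false := by simpa using hin
    rw [hin']
    simp

theorem pvGoA_cons_B_drop (x : String) (r : List String) (h : pvIsBoundary x = true)
    (hk : pvKeepHead x = false) : pvGoA (x :: r) = pvGoA (pvSkipA r) := by
  rw [pvGoA]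
  rw [pvBoundary_lstrip h]
  have hne : (x != "") = true := by
    rw [pvIsBoundary, Bool.and_eq_true] at h; exact h.1
  rw [pvKeepHead, Bool.or_eq_false_iff] at hk
  simp at hk
  simp [hne, hk.1, hk.2]

theorem pvSkipA_eq_dropWhile (r : List String) : pvSkipA r = r.dropWhile pvNotB := by
  induction r with
  | nil => rfl
  | cons next rest ih =>
    rw [pvSkipA, List.dropWhile_cons]
    by_cases h0 : PySem.Str.lstrip next = ""
    · have hb : pvIsBoundary next = false := by
        rw [pvIsBoundary]
        by_cases hn : next = ""
        · simp [hn]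
        · have hx : (next == PySem.Str.lstrip next) = false := by
            rw [beq_eq_false_iff_ne]; intro he; exact hn (by rw [he, h0])
          simp [hx]
      simp [pvNotB, hb, h0, ih]
    · by_cases h1 : ((next.length : Int) - ((PySem.Chars.lstrip next.toList).length : Int) = 0)
      · have hb : pvIsBoundary next = true := by
          rw [← pvBoundary_iff]; simp [h1, h0]
        simp [pvNotB, hb, h0, h1]
      · have hb : pvIsBoundary next = false := by
          rw [← pvBoundary_iff]; simp
          intro hc
          exact absurd hc h1
        simp [pvNotB, hb, h0, h1, ih]

theorem pvSpec_split (rest : List String) :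
    pvSpecRec rest = rest.takeWhile pvNotB ++ pvSpecRec (rest.dropWhile pvNotB) := by
  induction rest with
  | nil => rfl
  | cons x r ih =>
    by_cases hb : pvIsBoundary x = true
    · rw [List.takeWhile_cons, List.dropWhile_cons]
      simp [pvNotB, hb]
    · rw [pvSpecRec, List.takeWhile_cons, List.dropWhile_cons]
      have hb' : pvIsBoundary x = false := by simpa using hb
      simp [pvNotB, hb', ih]

theorem pvGoA_eq_spec (lines : List String) : pvGoA lines = pvSpecRec lines := by
  induction hn : lines.length using Nat.strong_induction_on generalizing lines with
  | _ n ih =>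
    cases lines with
    | nil => simp [pvGoA, pvSpecRec]
    | cons l rest =>
      subst hn
      by_cases hb : pvIsBoundary l = true
      · by_cases hk : pvKeepHead l = true
        · rw [pvGoA_cons_B_keep l rest hb hk, pvSpecRec]
          simp only [hb, hk, if_true]
          rw [ih rest.length (by simp) rest rfl, pvSpec_split rest]
          simp
        · have hk' : pvKeepHead l = false := by simpa using hk
          rw [pvGoA_cons_B_drop l rest hb hk', pvSkipA_eq_dropWhile, pvSpecRec]
          simp only [hb, hk', if_true, Bool.false_eq_true, if_false, List.nil_append]
          exact ih (rest.dropWhile pvNotB).length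
            (Nat.lt_succ_of_le (rest.length_dropWhile_le pvNotB)) _ rfl
      · have hb' : pvIsBoundary l = false := by simpa using hb
        rw [pvGoA_cons_notB l rest hb', pvSpecRec]
        simp only [hb', Bool.false_eq_true, if_false]
        rw [ih rest.length (by simp) rest rfl]

theorem pvFoldB_shift (lines : List String) (pre : List String) (segs : List (List String))
    (cur : Option (List String)) :
    lines.foldl pvStepB (pre, segs, cur) =
      (pre ++ (lines.foldl pvStepB ([], [], cur)).1,
       segs ++ (lines.foldl pvStepB ([], [], cur)).2.1,
       (lines.foldl pvStepB ([], [], cur)).2.2) := by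
  induction lines generalizing pre segs cur with
  | nil => simp
  | cons x t ih =>
    simp only [List.foldl_cons]
    by_cases hb : pvIsBoundary x = true
    · cases cur with
      | none =>
        simp only [pvStepB, hb, if_true]
        rw [ih pre segs (some [x]), ih [] [] (some [x])]
      | some c =>
        simp only [pvStepB, hb, if_true]
        rw [ih pre (segs ++ [c]) (some [x]), ih [] ([] ++ [c]) (some [x])]
        simp
    · have hb' : pvIsBoundary x = false := by simpa using hb
      cases cur with
      | none =>
        simp only [pvStepB, hb', Bool.false_eq_true, if_false]
        rw [ih (pre ++ [x]) segs none, ih ([] ++ [x]) [] none]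
        simp
      | some c =>
        simp only [pvStepB, hb', Bool.false_eq_true, if_false]
        rw [ih pre segs (some (c ++ [x])), ih [] [] (some (c ++ [x]))]

theorem pvFoldB_pre (lines : List String) (pre : List String) (segs : List (List String))
    (c : List String) : (lines.foldl pvStepB (pre, segs, some c)).1 = pre := by
  induction lines generalizing segs c with
  | nil => rfl
  | cons x t ih =>
    simp only [List.foldl_cons]
    by_cases hb : pvIsBoundary x = true
    · simp only [pvStepB, hb, if_true]
      exact ih (segs ++ [c]) [x]
    · have hb' : pvIsBoundary x = false := by simpa using hb
      simp only [pvStepB, hb', Bool.false_eq_true, if_false]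
      exact ih segs (c ++ [x])

theorem pvFoldB_run (rest : List String) (h : String) (c : List String) :
    pvFinal (rest.foldl pvStepB ([], [], some (h :: c))) =
      (if pvKeepHead h then (h :: c) ++ rest.takeWhile pvNotB else []) ++
        pvSpecRec (rest.dropWhile pvNotB) := by
  induction rest generalizing h c with
  | nil =>
    simp [pvFinal, pvSpecRec]
    by_cases hk : pvKeepHead h = true <;> simp [hk]
  | cons r t ih =>
    simp only [List.foldl_cons]
    by_cases hb : pvIsBoundary r = true
    · simp only [pvStepB, hb, if_true]
      rw [pvFoldB_shift t [] ([] ++ [h :: c]) (some [r])]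
      have hp : (t.foldl pvStepB ([], [], some [r])).1 = [] := pvFoldB_pre t [] [] [r]
      rw [List.takeWhile_cons, List.dropWhile_cons]
      simp only [pvNotB, hb, Bool.not_true, Bool.false_eq_true, if_false]
      rw [pvSpecRec]
      simp only [hb, if_true]
      have hrun := ih r []
      rw [pvFinal] at hrun ⊢
      simp only [hp, List.nil_append, List.append_nil] at hrun ⊢
      simp only [List.filter_append, List.append_assoc, List.flatten_append] at hrun ⊢
      rw [hrun]
      by_cases hk : pvKeepHead h = true <;> simp [hk]
    · have hb' : pvIsBoundary r = false := by simpa using hb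
      simp only [pvStepB, hb', Bool.false_eq_true, if_false]
      have : (h :: c) ++ [r] = h :: (c ++ [r]) := by simp
      rw [this, ih h (c ++ [r])]
      rw [List.takeWhile_cons, List.dropWhile_cons]
      simp only [pvNotB, hb', Bool.not_false, if_true]
      by_cases hk : pvKeepHead h = true <;> simp [hk]

theorem pvFoldB_eq_spec (lines : List String) :
    pvFinal (lines.foldl pvStepB ([], [], none)) = pvSpecRec lines := by
  induction lines with
  | nil => simp [pvFinal, pvSpecRec]
  | cons l t ih =>
    simp only [List.foldl_cons]
    by_cases hb : pvIsBoundary l = true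
    · simp only [pvStepB, hb, if_true]
      rw [pvFoldB_run t l [], pvSpecRec]
      simp only [hb, if_true]
      simp
    · have hb' : pvIsBoundary l = false := by simpa using hb
      simp only [pvStepB, hb', Bool.false_eq_true, if_false]
      rw [pvFoldB_shift t ([] ++ [l]) [] none]
      rw [pvFinal] at ih ⊢
      simp only [List.nil_append] at ih ⊢
      rw [pvSpecRec]
      simp only [hb', Bool.false_eq_true, if_false]
      simp only [List.append_assoc]
      rw [ih]
      simp

theorem pvTrimA_eq_trimB (l : List String) : pvTrimA l = (pvTrimB l.reverse).reverse := by
  induction l using List.reverseRecOn with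
  | nil => simp [pvTrimA, pvTrimB]
  | append_singleton ys x ih =>
    rw [pvTrimA]
    split
    · rename_i hnone
      rw [List.getLast?_concat] at hnone
      exact absurd hnone (by simp)
    · rename_i l hl
      rw [List.getLast?_concat] at hl
      injection hl with hx
      subst hx
      rw [List.dropLast_concat]
      have hrev : (ys ++ [x]).reverse = x :: ys.reverse := by simp
      rw [hrev, pvTrimB]
      by_cases hs : (PySem.Str.strip x == "") = true
      · simp only [hs, if_true]
        exact ih
      · have hs' : (PySem.Str.strip x == "") = false := by simpa using hs
        simp only [hs', Bool.false_eq_true, if_false]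
        simp

theorem pv_main (lines : List String) :
    pvTrimA (pvGoA lines) =
      (pvTrimB (pvFinal (lines.foldl pvStepB ([], [], none))).reverse).reverse := by
  rw [pvGoA_eq_spec, ← pvFoldB_eq_spec, pvTrimA_eq_trimB]

-- ===== VERDICT (by name: the statement is the Claim_ definition above) =====
theorem strip_managed_source_sections_py_spec : Claim_equal_strip_managed_source_sections_py := by
  intro raw _
  unfold Spec_strip_managed_source_sections_py strip_managed_source_sections_py strip_managed_source_sections_py_alt
  show PySem.Str.join "\n" (pvTrimA (pvGoA (PySem.Str.splitlines raw))) =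
    PySem.Str.join "\n"
      ((pvTrimB (pvFinal ((PySem.Str.splitlines raw).foldl pvStepB ([], [], none))).reverse).reverse)
  rw [pv_main]
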